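-- pv_equiv track=rewrite | github.com/cristhianvernal/ai-import-assistant | src/error_reporter.py | _get_processing_statistics
-- ===== SOURCE A (Python) =====
-- from typing import Dict, Any, List, Optional, Tuple
--
-- def _get_processing_statistics(processed_data: List[Dict[str, Any]]) -> Dict[str, Any]:
--     """Get processing method statistics"""
--     stats = {
--         'processing_methods': {},
--         'document_types': {},
--         'incoterms': {},
--         'currencies': {}
--     }
--
--     for doc in processed_data:
--         # Processing methods
--         method = doc.get('metodo_procesamiento', 'unknown')
--         stats['processing_methods'][method] = stats['processing_methods'].get(method, 0) + 1
--
--         # Document types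
--         doc_type = doc.get('tipo_documento', 'unknown')
--         stats['document_types'][doc_type] = stats['document_types'].get(doc_type, 0) + 1
--
--         # INCOTERMs
--         incoterm = doc.get('incoterm', 'No detectado')
--         if incoterm != 'No detectado':
--             stats['incoterms'][incoterm] = stats['incoterms'].get(incoterm, 0) + 1
--
--         # Currencies
--         currency = doc.get('moneda', 'No detectado')
--         if currency != 'No detectado':
--             stats['currencies'][currency] = stats['currencies'].get(currency, 0) + 1
--
--     return stats
-- ===== SOURCE B (Python) =====
-- def _get_processing_statistics(processed_data):
--     """Get processing method statistics (four independent tallies instead of one combined loop)."""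
--     def tally(values):
--         vs = list(values)
--         return {v: vs.count(v) for v in dict.fromkeys(vs)}
--     return {
--         'processing_methods': tally(doc.get('metodo_procesamiento', 'unknown') for doc in processed_data),
--         'document_types': tally(doc.get('tipo_documento', 'unknown') for doc in processed_data),
--         'incoterms': tally(v for v in (doc.get('incoterm', 'No detectado') for doc in processed_data) if v != 'No detectado'),
--         'currencies': tally(v for v in (doc.get('moneda', 'No detectado') for doc in processed_data) if v != 'No detectado'),
--     }
-- ===== Notes on version B (the rewrite author's own statement) =====
-- stated objective: simpler
-- what changed: A's single loop that incrementally updates four dicts with get(...)+1 is replaced by four independent tallies: for each key, map the documents to their value (filtering out the sentinel for incoterms/currencies) and build the dict as a comprehension {v: vs.count(v) for v in dict.fromkeys(vs)} (dedup-then-count instead of incremental accumulation).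
import Mathlib
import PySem

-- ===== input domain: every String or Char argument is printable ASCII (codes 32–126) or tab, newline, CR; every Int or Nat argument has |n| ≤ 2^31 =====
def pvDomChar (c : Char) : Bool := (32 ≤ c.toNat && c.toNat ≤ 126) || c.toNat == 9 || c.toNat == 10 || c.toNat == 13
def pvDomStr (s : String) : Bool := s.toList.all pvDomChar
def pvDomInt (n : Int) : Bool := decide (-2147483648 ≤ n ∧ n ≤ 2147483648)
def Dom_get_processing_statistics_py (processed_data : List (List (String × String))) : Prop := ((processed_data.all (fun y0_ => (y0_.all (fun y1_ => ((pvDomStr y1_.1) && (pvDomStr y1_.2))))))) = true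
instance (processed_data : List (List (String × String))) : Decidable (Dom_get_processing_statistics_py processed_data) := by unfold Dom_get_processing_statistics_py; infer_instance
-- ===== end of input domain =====

-- B replaces A's single accumulating loop by four independent tallies (dedup + count); objective: simpler.

-- ===== PORT A =====
-- one step of A's loop: updates the four running dicts for one document
def pvAStep (s : PySem.Dict String Int × PySem.Dict String Int × PySem.Dict String Int × PySem.Dict String Int)
    (doc : List (String × String)) :
    PySem.Dict String Int × PySem.Dict String Int × PySem.Dict String Int × PySem.Dict String Int :=
  let d := PySem.Dict.mk doc
  let method := d.getD "metodo_procesamiento" "unknown"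
  let pm := s.1.insert method (s.1.getD method 0 + 1)
  let doc_type := d.getD "tipo_documento" "unknown"
  let dt := s.2.1.insert doc_type (s.2.1.getD doc_type 0 + 1)
  let incoterm := d.getD "incoterm" "No detectado"
  let inc := if incoterm ≠ "No detectado" then s.2.2.1.insert incoterm (s.2.2.1.getD incoterm 0 + 1) else s.2.2.1
  let currency := d.getD "moneda" "No detectado"
  let cur := if currency ≠ "No detectado" then s.2.2.2.insert currency (s.2.2.2.getD currency 0 + 1) else s.2.2.2
  (pm, dt, inc, cur)

def get_processing_statistics_py (processed_data : List (List (String × String))) : List (String × List (String × Int)) :=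
  let s := processed_data.foldl pvAStep (PySem.Dict.empty, PySem.Dict.empty, PySem.Dict.empty, PySem.Dict.empty)
  [("processing_methods", s.1.items), ("document_types", s.2.1.items),
   ("incoterms", s.2.2.1.items), ("currencies", s.2.2.2.items)]

-- ===== PORT B =====
-- {v: vs.count(v) for v in dict.fromkeys(vs)}
def pvTally (vs : List String) : List (String × Int) :=
  (PySem.List.dedup vs).map (fun v => (v, (vs.count v : Int)))

-- doc.get(k, dflt)
def pvGetKey (k dflt : String) (doc : List (String × String)) : String :=
  (PySem.Dict.mk doc).getD k dflt

def get_processing_statistics_py_alt (processed_data : List (List (String × String))) : List (String × List (String × Int)) :=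
  [("processing_methods", pvTally (processed_data.map (pvGetKey "metodo_procesamiento" "unknown"))),
   ("document_types", pvTally (processed_data.map (pvGetKey "tipo_documento" "unknown"))),
   ("incoterms", pvTally ((processed_data.map (pvGetKey "incoterm" "No detectado")).filter (fun v => v != "No detectado"))),
   ("currencies", pvTally ((processed_data.map (pvGetKey "moneda" "No detectado")).filter (fun v => v != "No detectado")))]

-- ===== PRECONDITION & SPEC =====
def Spec_get_processing_statistics_py (processed_data : List (List (String × String))) (out : List (String × List (String × Int))) : Prop := out = get_processing_statistics_py_alt processed_data
instance (processed_data : List (List (String × String))) (out : List (String × List (String × Int))) : Decidable (Spec_get_processing_statistics_py processed_data out) := by unfold Spec_get_processing_statistics_py; infer_instance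

-- ===== CLAIM (what is proved, stated in full; the proofs are below) =====
def Claim_equal_get_processing_statistics_py : Prop := ∀ (processed_data : List (List (String × String))), Dom_get_processing_statistics_py processed_data → Spec_get_processing_statistics_py processed_data (get_processing_statistics_py processed_data)

-- ===== LEMMAS AND PROOFS =====

-- A's combined fold splits into four independent folds
theorem pvAStep_split (l : List (List (String × String)))
    (pm dt inc cur : PySem.Dict String Int) :
    l.foldl pvAStep (pm, dt, inc, cur) =
      (l.foldl (fun d doc => d.insert (pvGetKey "metodo_procesamiento" "unknown" doc)
                  (d.getD (pvGetKey "metodo_procesamiento" "unknown" doc) 0 + 1)) pm,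
       l.foldl (fun d doc => d.insert (pvGetKey "tipo_documento" "unknown" doc)
                  (d.getD (pvGetKey "tipo_documento" "unknown" doc) 0 + 1)) dt,
       l.foldl (fun d doc => if pvGetKey "incoterm" "No detectado" doc ≠ "No detectado" then
                  d.insert (pvGetKey "incoterm" "No detectado" doc)
                    (d.getD (pvGetKey "incoterm" "No detectado" doc) 0 + 1) else d) inc,
       l.foldl (fun d doc => if pvGetKey "moneda" "No detectado" doc ≠ "No detectado" then
                  d.insert (pvGetKey "moneda" "No detectado" doc)
                    (d.getD (pvGetKey "moneda" "No detectado" doc) 0 + 1) else d) cur) := by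
  induction l generalizing pm dt inc cur with
  | nil => rfl
  | cons doc rest ih =>
      simp only [List.foldl_cons]
      rw [ih]
      rfl

-- Prop-if with ≠ is Bool-if with !=
theorem pvIf_bool {β : Type} (s v : String) (a b : β) :
    (if v ≠ s then a else b) = (if v != s then a else b) := by
  simp [bne_iff_ne]

-- a conditional fold is the fold over the filtered list
theorem pvFoldl_filter {α β : Type} (p : α → Bool) (g : β → α → β) (l : List α) (b : β) :
    l.foldl (fun d x => if p x then g d x else d) b = (l.filter p).foldl g b := by
  induction l generalizing b with
  | nil => rfl
  | cons x rest ih =>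
      by_cases h : p x = true <;> simp [h, ih]

-- the unconditional per-key fold, keyed through `key`, is the counter of the mapped list
theorem pvFold_eq_counter (key : List (String × String) → String)
    (l : List (List (String × String))) :
    l.foldl (fun d doc => d.insert (key doc) (d.getD (key doc) 0 + 1)) PySem.Dict.empty =
      PySem.Dict.counter (l.map key) := by
  rw [← PySem.Dict.foldl_insert_getD_add_one_eq_counter, List.foldl_map]

-- and its items are B's tally
theorem pvItems_counter_tally (vs : List String) :
    (PySem.Dict.counter vs).items = pvTally vs := by
  simp [PySem.Dict.items_counter, pvTally]

-- ===== VERDICT (by name: the statement is the Claim_ definition above) =====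
theorem get_processing_statistics_py_spec : Claim_equal_get_processing_statistics_py := by
  intro pd _
  unfold Spec_get_processing_statistics_py get_processing_statistics_py get_processing_statistics_py_alt
  rw [pvAStep_split]
  simp only [pvIf_bool]
  rw [pvFoldl_filter, pvFoldl_filter,
      pvFold_eq_counter, pvFold_eq_counter, pvFold_eq_counter, pvFold_eq_counter,
      pvItems_counter_tally, pvItems_counter_tally, pvItems_counter_tally, pvItems_counter_tally]
  simp only [List.filter_map, Function.comp_def]
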